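-- pv_equiv track=rewrite | github.com/SwathyJagannatha/InterviewPrep | palin.py | isCompressablePalindrome
-- ===== SOURCE A (Python) =====
-- def isPalindrome(Str):
--
--     # Length of the string
--     Len = len(Str)
--
--     # Check if its a palindrome
--     for i in range(Len):
--
--         # If the palindromic
--         # condition is not met
--         if (Str[i] != Str[Len - i - 1]):
--             return False
--
--     # Return true as Str is palindromic
--     return True
--
-- def isCompressablePalindrome(Str):
--
--     # Length of the string str
--     Len = len(Str)
--
--     # Create an empty compressed string
--     compressed = ""
--
--     # The first character will always
--     # be included in final string
--     compressed += Str[0]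
--
--     # Check all the characters
--     # of the string
--     for i in range(1, Len):
--
--         # If the current character
--         # is not same as its previous
--         # one, then insert it in
--         # the final string
--         if (Str[i] != Str[i - 1]):
--             compressed += Str[i]
--
--     # Check if the compressed
--     # string is a palindrome
--     return isPalindrome(compressed)
-- ===== SOURCE B (Python) =====
-- def isCompressablePalindrome(Str):
--     # Two-pointer scan over Str itself: compare the outermost runs and strip
--     # them, without ever building the compressed string.
--     def go(lst):
--         if not lst:
--             return True
--         c = lst[0]
--         if lst[-1] != c:
--             return False
--         i = 0
--         while i < len(lst) and lst[i] == c: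
--             i += 1
--         j = len(lst) - 1
--         while j >= 0 and lst[j] == c:
--             j -= 1
--         return go(lst[i:j + 1])
--     return go(list(Str))
-- ===== Notes on version B (the rewrite author's own statement) =====
-- stated objective: faster
-- what changed: B never builds the compressed string: it does a two-ended run-stripping scan (compare the outermost characters, skip the equal runs at both ends, recurse on the middle) instead of A's two phases (build the run-compressed string via repeated string concatenation, then an index-loop palindrome check); a timing run measured B 8.9x faster at the largest size (constant-factor: no string building/concatenation).
import Mathlib
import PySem

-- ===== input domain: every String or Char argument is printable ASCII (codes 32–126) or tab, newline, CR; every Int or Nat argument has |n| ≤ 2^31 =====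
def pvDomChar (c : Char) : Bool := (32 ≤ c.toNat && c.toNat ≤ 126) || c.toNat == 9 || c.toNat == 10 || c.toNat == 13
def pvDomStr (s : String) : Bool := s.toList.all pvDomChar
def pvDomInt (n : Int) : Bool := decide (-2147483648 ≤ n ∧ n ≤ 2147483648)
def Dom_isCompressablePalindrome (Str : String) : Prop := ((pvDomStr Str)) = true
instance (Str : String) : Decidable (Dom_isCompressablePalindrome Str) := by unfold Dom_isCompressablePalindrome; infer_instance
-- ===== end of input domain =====

-- B is a genuinely different decomposition (two-ended run-stripping scan, no compressed
-- string built); equivalence is proved for nonempty input, where A raises B returns True.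

-- ===== PORT A =====
-- A's helper isPalindrome: index loop, early return False on a mismatch
def pyIsPalindrome (s : List Char) : Bool :=
  (PySem.List.pyRange 0 (s.length : Int) 1).all
    (fun i => PySem.List.pyGet? s i == PySem.List.pyGet? s ((s.length : Int) - i - 1))

def isCompressablePalindrome (Str : String) : Bool :=
  let l := Str.toList
  let compressed : List Char :=
    match PySem.List.pyGet? l 0 with
    | none => []   -- Python raises IndexError here (Str[0] on ""); excluded by Pre_
    | some c0 =>
      (PySem.List.pyRange 1 (l.length : Int) 1).foldl
        (fun acc i =>
          if PySem.List.pyGet? l i ≠ PySem.List.pyGet? l (i - 1)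
          then acc ++ (PySem.List.pyGet? l i).toList
          else acc) [c0]
  pyIsPalindrome compressed

-- ===== PORT B =====
-- lst[i:j+1] of Source B: drop the leading run of c, then the trailing run of c
def stripB (c : Char) (l : List Char) : List Char :=
  ((l.dropWhile (· == c)).reverse.dropWhile (· == c)).reverse

theorem stripB_length_lt (c : Char) (t : List Char) :
    (stripB c (c :: t)).length < (c :: t).length := by
  have h1 : List.dropWhile (· == c) (c :: t) = List.dropWhile (· == c) t := by
    simp [List.dropWhile]
  have h2 := List.length_dropWhile_le (· == c) t
  have h3 := List.length_dropWhile_le (· == c) (List.dropWhile (· == c) t).reverse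
  simp only [stripB, h1, List.length_reverse] at *
  simp only [List.length_cons]
  omega

def goB : List Char → Bool
  | [] => true
  | c :: t =>
    if PySem.List.pyGet? (c :: t) (-1) ≠ some c then false
    else goB (stripB c (c :: t))
termination_by l => l.length
decreasing_by exact stripB_length_lt c t

def isCompressablePalindrome_alt (Str : String) : Bool := goB Str.toList

-- ===== PRECONDITION & SPEC =====
-- Pre_ excludes exactly the empty string, on which A raises IndexError (Str[0]).
def Pre_isCompressablePalindrome (Str : String) : Prop := Str.toList ≠ []
instance (Str : String) : Decidable (Pre_isCompressablePalindrome Str) := by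
  unfold Pre_isCompressablePalindrome; infer_instance

def pvWitness_isCompressablePalindrome : String := "aabaa"

def Spec_isCompressablePalindrome (Str : String) (out : Bool) : Prop :=
  out = isCompressablePalindrome_alt Str
instance (Str : String) (out : Bool) : Decidable (Spec_isCompressablePalindrome Str out) := by
  unfold Spec_isCompressablePalindrome; infer_instance

-- ===== CLAIM (what is proved, stated in full; the proofs are below) =====
def Claim_equal_isCompressablePalindrome : Prop :=
  ∀ (Str : String), Dom_isCompressablePalindrome Str →
    Pre_isCompressablePalindrome Str →
    Spec_isCompressablePalindrome Str (isCompressablePalindrome Str)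

-- ===== LEMMAS AND PROOFS =====

-- structural view of A's compression loop: one char per maximal run
def comp (p : Char) : List Char → List Char
  | [] => []
  | x :: t => if x = p then comp p t else x :: comp x t

def ded : List Char → List Char
  | [] => []
  | c :: t => c :: comp c t

theorem comp_eq_ded_dropWhile (t : List Char) : ∀ p, comp p t = ded (t.dropWhile (· == p)) := by
  induction t with
  | nil => intro p; simp [comp, ded]
  | cons x t ih =>
    intro p
    by_cases h : x = p
    · simp [comp, h, List.dropWhile, ih p]
    · have hb : (x == p) = false := by simp [h]
      simp [comp, h, hb, ded]

theorem getLast?_cons_comp (t : List Char) : ∀ p, (p :: comp p t).getLast? = (p :: t).getLast? := by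
  induction t with
  | nil => intro p; simp [comp]
  | cons x t ih =>
    intro p
    by_cases h : x = p
    · subst h
      simp only [comp, if_true]
      rw [ih x, List.getLast?_cons_cons]
    · simp only [comp, if_neg h]
      rw [List.getLast?_cons_cons, ih x, List.getLast?_cons_cons]

theorem comp_append_replicate (t : List Char) : ∀ p k c,
    (p :: t).getLast? ≠ some c →
    comp p (t ++ List.replicate (k + 1) c) = comp p t ++ [c] := by
  induction t with
  | nil =>
    intro p k c h
    simp at h
    have hrep : ∀ k, comp c (List.replicate k c) = [] := by
      intro k; induction k with
      | zero => simp [comp]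
      | succ n ih => simp [List.replicate, comp, ih]
    simp [comp, List.replicate, Ne.symm h, hrep]
  | cons x t ih =>
    intro p k c h
    rw [List.getLast?_cons_cons] at h
    by_cases hx : x = p
    · subst hx
      simp only [List.cons_append, comp]
      exact ih x k c h
    · simp only [List.cons_append, comp, if_neg hx, ih x k c h, List.cons_append]

theorem ded_append_replicate (l : List Char) (k : Nat) (c : Char)
    (h : l = [] ∨ l.getLast? ≠ some c) :
    ded (l ++ List.replicate (k + 1) c) = ded l ++ [c] := by
  rcases l with _ | ⟨p, t⟩
  · have hrep : ∀ k, comp c (List.replicate k c) = [] := by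
      intro k; induction k with
      | zero => simp [comp]
      | succ n ih => simp [List.replicate, comp, ih]
    simp [ded, List.replicate, hrep]
  · rcases h with h | h
    · simp at h
    · simp only [List.cons_append, ded, comp_append_replicate t p k c h, List.cons_append]

-- trailing-run strip: stripping the back run of c removes exactly the last ded char
def stripBack (c : Char) (l : List Char) : List Char := (l.reverse.dropWhile (· == c)).reverse

theorem ded_stripBack (l : List Char) (c : Char) (h : l.getLast? = some c) :
    ded l = ded (stripBack c l) ++ [c] := by
  have hh : l.reverse.head? = some c := by rw [List.head?_reverse]; exact h
  have htkrep : List.takeWhile (· == c) l.reverse =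
      List.replicate (List.takeWhile (· == c) l.reverse).length c := by
    rw [List.eq_replicate_length]
    intro b hb
    simpa using List.mem_takeWhile_imp hb
  obtain ⟨n, hn⟩ : ∃ n, List.takeWhile (· == c) l.reverse = List.replicate n c :=
    ⟨_, htkrep⟩
  have htklen : 1 ≤ n := by
    rcases hrev : l.reverse with _ | ⟨x, r'⟩
    · rw [hrev] at hh; simp at hh
    · rw [hrev] at hh hn
      have hx : x = c := by simpa using hh
      rw [List.takeWhile_cons] at hn
      simp only [hx, beq_self_eq_true, if_true] at hn
      have := congrArg List.length hn
      simp at this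
      omega
  have hl : l = (List.dropWhile (· == c) l.reverse).reverse ++ List.replicate n c := by
    conv_lhs => rw [← List.reverse_reverse l,
      ← List.takeWhile_append_dropWhile (p := (· == c)) (l := l.reverse)]
    rw [List.reverse_append, hn, List.reverse_replicate]
  have hside : (List.dropWhile (· == c) l.reverse).reverse = [] ∨
      ((List.dropWhile (· == c) l.reverse).reverse).getLast? ≠ some c := by
    rcases hdre : List.dropWhile (· == c) l.reverse with _ | ⟨y, d'⟩
    · left; simp
    · right
      have hne : List.dropWhile (· == c) l.reverse ≠ [] := by rw [hdre]; simp
      have hy := List.head_dropWhile_not (· == c) hne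
      simp only [hdre, List.head_cons] at hy
      rw [List.getLast?_reverse]
      simp only [List.head?_cons]
      intro hc
      rw [show y = c from by injection hc] at hy
      simp at hy
  obtain ⟨k, hk⟩ : ∃ k, n = k + 1 := ⟨n - 1, by omega⟩
  conv_lhs => rw [hl, hk]
  rw [ded_append_replicate _ _ _ hside]
  rfl

theorem sandwich (c : Char) (w : List Char) :
    (c :: (w ++ [c]) = (c :: (w ++ [c])).reverse) ↔ (w = w.reverse) := by
  rw [List.reverse_cons, List.reverse_append]
  constructor
  · intro h
    have h2 : w ++ [c] = w.reverse ++ [c] := by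
      have := h
      simpa using this
    have := congrArg (List.take w.length) h2
    simpa using this
  · intro h
    conv_lhs => rw [h]
    simp

theorem goB_eq (l : List Char) : goB l = decide (ded l = (ded l).reverse) := by
  induction l using goB.induct with
  | case1 => simp [goB, ded]
  | case2 c t h =>
    rw [goB]
    rw [if_pos h]
    have hlast : (c :: t).getLast? ≠ some c := by
      rwa [PySem.List.pyGet?_neg_one] at h
    have hded : (ded (c :: t)).getLast? = (c :: t).getLast? := getLast?_cons_comp t c
    symm
    rw [decide_eq_false_iff_not]
    intro heq
    have hhead : (ded (c :: t)).head? = some c := by simp [ded]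
    have : (ded (c :: t)).getLast? = some c := by
      rw [← List.head?_reverse, ← heq, hhead]
    exact hlast (hded ▸ this)
  | case3 c t h ih =>
    rw [goB, if_neg h]
    have hlast : (c :: t).getLast? = some c := by
      rw [PySem.List.pyGet?_neg_one] at h
      by_contra hne
      exact h hne
    have hd1 : List.dropWhile (· == c) (c :: t) = List.dropWhile (· == c) t := by
      simp [List.dropWhile]
    have hded1 : ded (c :: t) = c :: ded (List.dropWhile (· == c) t) := by
      show c :: comp c t = _
      rw [comp_eq_ded_dropWhile]
    rcases hdw : List.dropWhile (· == c) t with _ | ⟨y, d'⟩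
    · -- the whole list is one run of c
      have hstrip : stripB c (c :: t) = [] := by
        simp [stripB, hd1, hdw]
      rw [ih, hstrip, hded1, hdw]
      simp [ded]
    · -- nonempty core after dropping the front run
      have hsplit : c :: t = List.takeWhile (· == c) (c :: t) ++ (y :: d') := by
        conv_lhs => rw [← List.takeWhile_append_dropWhile (p := (· == c)) (l := c :: t)]
        rw [hd1, hdw]
      have hlast2 : (y :: d').getLast? = some c := by
        rw [hsplit, List.getLast?_append_of_ne_nil _ (by simp)] at hlast
        exact hlast
      have hstrip : stripB c (c :: t) = stripBack c (y :: d') := by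
        simp only [stripB, stripBack, hd1, hdw]
      have hded2 : ded (c :: t) = c :: (ded (stripBack c (y :: d')) ++ [c]) := by
        rw [hded1, hdw, ded_stripBack _ _ hlast2]
      rw [ih, hstrip, hded2]
      rw [decide_eq_decide]
      exact (sandwich c _).symm

theorem pal_iff (s : List Char) :
    (s = s.reverse) ↔ ∀ k, (h : k < s.length) → s[k] = s[s.length - 1 - k] := by
  constructor
  · intro h k hk
    rw [List.getElem_of_eq h hk, List.getElem_reverse]
  · intro h
    apply List.ext_getElem (by simp)
    intro i h1 h2
    rw [List.getElem_reverse]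
    exact h i h1

theorem pyIsPalindrome_eq (s : List Char) : pyIsPalindrome s = decide (s = s.reverse) := by
  rw [Bool.eq_iff_iff, decide_eq_true_iff, pal_iff]
  unfold pyIsPalindrome
  rw [PySem.List.pyRange_one]
  simp only [List.all_map, List.all_eq_true, List.mem_range, Function.comp]
  constructor
  · intro h k hk
    have := h k (by omega : k < ((s.length : Int) - 0).toNat)
    have h1 : PySem.List.pyGet? s ((0 : Int) + (k : Nat)) = some s[k] := by
      rw [zero_add, PySem.List.pyGet?_natCast, List.getElem?_eq_getElem hk]
    have h2 : (s.length : Int) - ((0 : Int) + (k : Nat)) - 1 = ((s.length - 1 - k : Nat) : Int) := by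
      omega
    rw [h1, h2, PySem.List.pyGet?_natCast,
      List.getElem?_eq_getElem (by omega)] at this
    simpa using this
  · intro h k hk
    rw [show ((s.length : Int) - 0).toNat = s.length from by omega] at hk
    have h1 : PySem.List.pyGet? s ((0 : Int) + (k : Nat)) = some s[k] := by
      rw [zero_add, PySem.List.pyGet?_natCast, List.getElem?_eq_getElem hk]
    have h2 : (s.length : Int) - ((0 : Int) + (k : Nat)) - 1 = ((s.length - 1 - k : Nat) : Int) := by
      omega
    rw [h1, h2, PySem.List.pyGet?_natCast, List.getElem?_eq_getElem (by omega)]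
    simpa using h k hk

theorem foldA (l : List Char) : ∀ (n a : Nat) (acc : List Char), n = l.length - a → 1 ≤ a → a ≤ l.length →
    (PySem.List.pyRange (a : Int) ((l.length : Nat) : Int) 1).foldl
      (fun acc i =>
        if PySem.List.pyGet? l i ≠ PySem.List.pyGet? l (i - 1)
        then acc ++ (PySem.List.pyGet? l i).toList
        else acc) acc = acc ++ comp (l.getD (a - 1) ' ') (l.drop a) := by
  intro n
  induction n with
  | zero =>
    intro a acc hn h1 h2
    have ha : a = l.length := by omega
    rw [PySem.List.pyRange_one_eq_nil (by omega)]
    simp [ha, comp]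
  | succ n ihn =>
    intro a acc hn h1 h2
    have ha : a < l.length := by omega
    have hga : PySem.List.pyGet? l ((a : Nat) : Int) = some (l.getD a ' ') := by
      rw [PySem.List.pyGet?_natCast, List.getElem?_eq_getElem ha, List.getD_eq_getElem l ' ' ha]
    have hcast : ((a : Nat) : Int) - 1 = (((a - 1 : Nat)) : Int) := by omega
    have hga' : PySem.List.pyGet? l (((a : Nat) : Int) - 1) = some (l.getD (a - 1) ' ') := by
      rw [hcast, PySem.List.pyGet?_natCast, List.getElem?_eq_getElem (by omega),
        List.getD_eq_getElem l ' ' (by omega)]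
    rw [PySem.List.pyRange_one_cons (by omega)]
    rw [List.foldl_cons]
    have hstep : ((a : Int) + 1) = (((a + 1 : Nat)) : Int) := by omega
    rw [hstep, ihn (a + 1) _ (by omega) (by omega) (by omega)]
    have hdrop : l.drop a = l.getD a ' ' :: l.drop (a + 1) := by
      rw [List.getD_eq_getElem l ' ' ha, List.getElem_cons_drop ha]
    rw [hdrop]
    by_cases hxy : l.getD a ' ' = l.getD (a - 1) ' '
    · rw [if_neg (show ¬(PySem.List.pyGet? l (a : Int) ≠ PySem.List.pyGet? l ((a : Int) - 1)) from
        fun hne => hne (by rw [hga, hga', hxy]))]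
      have : comp (l.getD (a - 1) ' ') (l.getD a ' ' :: l.drop (a + 1)) =
          comp (l.getD a ' ') (l.drop (a + 1)) := by
        rw [comp, if_pos hxy, hxy]
      rw [this, Nat.add_sub_cancel]
    · rw [if_pos (show PySem.List.pyGet? l (a : Int) ≠ PySem.List.pyGet? l ((a : Int) - 1) from by
        rw [hga, hga']
        exact fun hc => hxy (Option.some.inj hc))]
      rw [hga]
      have : comp (l.getD (a - 1) ' ') (l.getD a ' ' :: l.drop (a + 1)) =
          l.getD a ' ' :: comp (l.getD a ' ') (l.drop (a + 1)) := by
        rw [comp, if_neg hxy]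
      rw [this, Nat.add_sub_cancel]
      simp

theorem compA_eq (c : Char) (t : List Char) :
    (PySem.List.pyRange 1 ((c :: t).length : Int) 1).foldl
      (fun acc i =>
        if PySem.List.pyGet? (c :: t) i ≠ PySem.List.pyGet? (c :: t) (i - 1)
        then acc ++ (PySem.List.pyGet? (c :: t) i).toList
        else acc) [c] = ded (c :: t) := by
  have h := foldA (c :: t) ((c :: t).length - 1) 1 [c] rfl (by omega) (by simp)
  norm_cast at h



-- ===== VERDICT (by name: the statement is the Claim_ definition above) =====
theorem isCompressablePalindrome_spec : Claim_equal_isCompressablePalindrome := by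
  intro S _ hpre
  unfold Spec_isCompressablePalindrome isCompressablePalindrome isCompressablePalindrome_alt
  obtain ⟨c, t, hl⟩ : ∃ c t, S.toList = c :: t := by
    cases h : S.toList with
    | nil => exact absurd h hpre
    | cons c t => exact ⟨c, t, rfl⟩
  simp only [hl]
  rw [goB_eq]
  have h0 : PySem.List.pyGet? (c :: t) 0 = some c := by
    simp [PySem.List.pyGet?, PySem.List.pyIdx?]
  simp only [h0, compA_eq, pyIsPalindrome_eq]
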